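-- pv_equiv track=rewrite | github.com/chaselover/practiceAlgorithm | nefa_1.py | solution
-- ===== SOURCE A (Python) =====
-- from collections import defaultdict
--
-- def solution(id_list, k):
--     total = defaultdict(int)
--     for day in id_list:
--         check = set()
--         for each in day.split():
--             check.add(each)
--         for num in check:
--             if total[num] < k:
--                 total[num] += 1
--     answer = 0
--     for each in total.values():
--         answer += each
--     return answer
-- ===== SOURCE B (Python) =====
-- def solution(id_list, k):
--     # Flatten: one entry per (day, distinct token) pair.
--     tokens = []
--     for day in id_list:
--         tokens.extend(set(day.split()))
--     tokens.sort()
--     # Sort-then-scan: equal tokens are now adjacent; sum run lengths capped at max(k, 0).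
--     cap = k if k > 0 else 0
--     answer = 0
--     i = 0
--     n = len(tokens)
--     while i < n:
--         j = i
--         while j < n and tokens[j] == tokens[i]:
--             j += 1
--         answer += min(j - i, cap)
--         i = j
--     return answer
-- ===== Notes on version B (the rewrite author's own statement) =====
-- stated objective: alternative
-- what changed: B uses no dictionary at all: it flattens the per-day distinct tokens into one list, sorts it, and sums run lengths capped at max(k,0) in a linear scan, instead of A's capped per-key counting in a defaultdict.
import Mathlib
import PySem

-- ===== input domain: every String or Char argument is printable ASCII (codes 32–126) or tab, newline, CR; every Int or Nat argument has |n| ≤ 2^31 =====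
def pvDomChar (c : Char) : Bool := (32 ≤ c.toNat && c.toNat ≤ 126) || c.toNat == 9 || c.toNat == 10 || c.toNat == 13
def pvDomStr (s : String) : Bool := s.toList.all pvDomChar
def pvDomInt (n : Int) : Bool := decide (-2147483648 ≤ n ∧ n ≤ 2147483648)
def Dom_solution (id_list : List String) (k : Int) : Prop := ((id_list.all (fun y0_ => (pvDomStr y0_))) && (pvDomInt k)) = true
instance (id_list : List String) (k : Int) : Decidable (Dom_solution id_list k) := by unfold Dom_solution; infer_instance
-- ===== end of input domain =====

-- B replaces A's defaultdict counting by sort-then-scan: flatten the per-day distinct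
-- tokens, sort, and sum run lengths capped at max(k,0); objective: alternative algorithm.

-- ===== PORT A =====
def solution (id_list : List String) (k : Int) : Int :=
  let total : PySem.Dict String Int := id_list.foldl (fun total day =>
    let check : PySem.Set String :=
      (PySem.Str.split₀ day).foldl PySem.Set.add PySem.Set.empty
    check.foldl (fun total num =>
      let total := if total.contains num then total else total.insert num 0  -- defaultdict access total[num]
      if total.getD num 0 < k then total.insert num (total.getD num 0 + 1) else total)
      total) PySem.Dict.empty
  total.values.foldl (fun answer each => answer + each) 0

-- ===== PORT B =====
/-- The two-pointer run scan: `while i < n: j = i; while tokens[j] == tokens[i]: j += 1;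
    answer += min(j - i, cap); i = j` — one recursive step per run. -/
def pvRunScan (cap : Int) : List String → Int
  | [] => 0
  | x :: xs =>
      min ((1 + (xs.takeWhile (fun y => y == x)).length : Nat) : Int) cap
        + pvRunScan cap (xs.dropWhile (fun y => y == x))
  termination_by l => l.length
  decreasing_by
    simp only [List.length_cons]
    exact Nat.lt_succ_of_le (List.length_dropWhile_le _ _)

def solution_alt (id_list : List String) (k : Int) : Int :=
  let tokens : List String := id_list.foldl
    (fun tokens day => tokens ++ (PySem.Set.ofList (PySem.Str.split₀ day) : List String)) []
  let tokens := PySem.List.sorted tokens (fun x => x) false   -- tokens.sort()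
  let cap : Int := if k > 0 then k else 0
  pvRunScan cap tokens

-- ===== PRECONDITION & SPEC =====
def Spec_solution (id_list : List String) (k : Int) (out : Int) : Prop := out = solution_alt id_list k
instance (id_list : List String) (k : Int) (out : Int) : Decidable (Spec_solution id_list k out) := by unfold Spec_solution; infer_instance

-- ===== CLAIM (what is proved, stated in full; the proofs are below) =====
def Claim_equal_solution : Prop := ∀ (id_list : List String) (k : Int), Dom_solution id_list k → Spec_solution id_list k (solution id_list k)

-- ===== LEMMAS AND PROOFS =====

/-- The common value: sum over the distinct elements of `l` of the capped count. -/
def pvG (cap : Int) (l : List String) : Int :=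
  ((PySem.Set.ofList l).map (fun x => min (l.count x : Int) cap)).sum

/-- Invariant relating A's capped dict to the uncapped counter. -/
def pvInv (k : Int) (dA dB : PySem.Dict String Int) : Prop :=
  dB.keys.Nodup ∧ (∀ p ∈ dB.items, 1 ≤ p.2) ∧
    dA.items = dB.items.map (fun p => (p.1, min p.2 (if 0 < k then k else 0)))

lemma pv_fst_eq_of_nodup_fst {α β : Type} (l : List (α × β))
    (h : (l.map Prod.fst).Nodup) {p q : α × β} (hp : p ∈ l) (hq : q ∈ l)
    (he : p.1 = q.1) : p = q := by
  induction l with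
  | nil => cases hp
  | cons x xs ih =>
    simp only [List.map_cons, List.nodup_cons] at h
    rcases List.mem_cons.1 hp with rfl | hp' <;> rcases List.mem_cons.1 hq with rfl | hq'
    · rfl
    · exact absurd (he ▸ List.mem_map_of_mem hq') h.1
    · exact absurd (he ▸ List.mem_map_of_mem hp') h.1
    · exact ih h.2 hp' hq'

lemma pvInv_keys {k : Int} {dA dB : PySem.Dict String Int} (h : pvInv k dA dB) :
    dA.keys = dB.keys := by
  simp only [PySem.Dict.keys, h.2.2, List.map_map]
  rfl

lemma pvInv_empty (k : Int) : pvInv k PySem.Dict.empty PySem.Dict.empty := by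
  refine ⟨by simp [PySem.Dict.keys, PySem.Dict.empty], by simp [PySem.Dict.empty], ?_⟩
  simp [PySem.Dict.empty]

lemma pvInv_step (k : Int) (dA dB : PySem.Dict String Int) (num : String)
    (h : pvInv k dA dB) :
    pvInv k
      (let t := if dA.contains num then dA else dA.insert num 0;
       if t.getD num 0 < k then t.insert num (t.getD num 0 + 1) else t)
      (dB.insert num (dB.getD num 0 + 1)) := by
  obtain ⟨hnd, hpos, hitems⟩ := h
  have hkeys : dA.keys = dB.keys := pvInv_keys ⟨hnd, hpos, hitems⟩
  have hcont : dA.contains num = dB.contains num := by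
    simp [PySem.Dict.contains_eq_decide_mem_keys, hkeys]
  by_cases hc : dB.contains num = true
  · -- existing key: B's count b ≥ 1, A holds min b cap
    obtain ⟨b, hb⟩ := Option.isSome_iff_exists.1
      (PySem.Dict.contains_eq_isSome_get? dB num ▸ hc)
    have hbmem : (num, b) ∈ dB.items := PySem.Dict.mem_items_of_get?_eq_some dB hb
    have hb1 : (1 : Int) ≤ b := hpos _ hbmem
    have hndA : dA.keys.Nodup := hkeys ▸ hnd
    have hgetB : dB.getD num 0 = b := PySem.Dict.getD_of_mem_items dB hbmem hnd 0
    have hamem : (num, min b (if 0 < k then k else 0)) ∈ dA.items := by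
      rw [hitems]; exact List.mem_map_of_mem hbmem
    have hgetA : dA.getD num 0 = min b (if 0 < k then k else 0) :=
      PySem.Dict.getD_of_mem_items dA hamem hndA 0
    simp only [hcont, hc, if_true, hgetA, hgetB]
    have hBit := PySem.Dict.items_insert_of_contains dB (b + 1) hc
    have hkeysB : (dB.insert num (b + 1)).keys.Nodup := PySem.Dict.nodup_keys_insert dB _ _ hnd
    have hfix : ∀ p ∈ dB.items, p.1 = num → p = (num, b) :=
      fun p hp hpe => pv_fst_eq_of_nodup_fst dB.items hnd hp hbmem hpe
    have hposB : ∀ p ∈ (dB.insert num (b + 1)).items, 1 ≤ p.2 := by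
      intro p hp
      rw [hBit] at hp
      obtain ⟨q, hq, rfl⟩ := List.mem_map.1 hp
      have := hpos _ hq
      split <;> simp <;> omega
    by_cases hlt : min b (if 0 < k then k else 0) < k
    · rw [if_pos hlt]
      have hk0 : (0 : Int) < k := by by_cases h0 : (0:Int) < k <;> simp [h0] at hlt <;> omega
      refine ⟨hkeysB, hposB, ?_⟩
      rw [PySem.Dict.items_insert_of_contains dA _ (hcont ▸ hc), hBit, hitems,
        List.map_map, List.map_map]
      refine List.map_congr_left ?_
      intro p hp
      by_cases hpe : p.1 = num
      · obtain rfl := hfix p hp hpe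
        simp only [Function.comp_apply, beq_self_eq_true, if_true, hk0, Prod.mk.injEq,
          true_and]
        simp only [hk0, if_true] at hlt
        omega
      · simp [Function.comp_apply, hpe]
    · rw [if_neg hlt]
      refine ⟨hkeysB, hposB, ?_⟩
      rw [hBit, hitems, List.map_map]
      refine List.map_congr_left ?_
      intro p hp
      by_cases hpe : p.1 = num
      · obtain rfl := hfix p hp hpe
        simp only [Function.comp_apply, beq_self_eq_true, if_true, Prod.mk.injEq, true_and]
        by_cases hk0 : (0 : Int) < k <;> simp only [hk0, if_true, if_false] at hlt ⊢ <;> omega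
      · simp [Function.comp_apply, hpe]
  · -- fresh key: A appends (num, min 1 cap), B appends (num, 1)
    have hcf : dB.contains num = false := by simpa using hc
    have hcA : dA.contains num = false := by rw [hcont]; exact hcf
    have hgB : dB.getD num 0 = 0 := PySem.Dict.getD_of_not_contains dB 0 hcf
    simp only [hcA, Bool.false_eq_true, if_false, hgB,
      PySem.Dict.getD_insert_self dA num 0 0]
    have hBit := PySem.Dict.items_insert_of_not_contains dB (0 + 1) hcf
    have hkeysB : (dB.insert num (0 + 1)).keys.Nodup := PySem.Dict.nodup_keys_insert dB _ _ hnd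
    have hposB : ∀ p ∈ (dB.insert num (0 + 1)).items, 1 ≤ p.2 := by
      intro p hp
      rw [hBit] at hp
      rcases List.mem_append.1 hp with hp' | hp'
      · exact hpos _ hp'
      · simp only [List.mem_singleton] at hp'; subst hp'; norm_num
    by_cases hk : (0 : Int) < k
    · rw [if_pos hk]
      refine ⟨hkeysB, hposB, ?_⟩
      rw [PySem.Dict.insert_insert_self,
        PySem.Dict.items_insert_of_not_contains dA (0 + 1) hcA, hBit, hitems,
        List.map_append]
      simp [hk]
      omega
    · rw [if_neg hk]
      refine ⟨hkeysB, hposB, ?_⟩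
      rw [PySem.Dict.items_insert_of_not_contains dA 0 hcA, hBit, hitems, List.map_append]
      simp [hk]

lemma pvInv_fold (k : Int) (toks : List String) (dA dB : PySem.Dict String Int)
    (h : pvInv k dA dB) :
    pvInv k
      (toks.foldl (fun total num =>
        let total := if total.contains num then total else total.insert num 0;
        if total.getD num 0 < k then total.insert num (total.getD num 0 + 1) else total) dA)
      (toks.foldl (fun counts token => counts.insert token (counts.getD token 0 + 1)) dB) := by
  induction toks generalizing dA dB with
  | nil => exact h
  | cons t ts ih => exact ih _ _ (pvInv_step k dA dB t h)

/-- Flattening fold peels off as an append. -/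
lemma pv_foldl_append (f : String → List String) (l : List String) (acc : List String) :
    l.foldl (fun t day => t ++ f day) acc = acc ++ l.flatMap f := by
  induction l generalizing acc with
  | nil => simp
  | cons d ds ih => simp [ih, List.flatMap_cons, List.append_assoc]

/-- The nested counting fold over days is the counting fold over the flattened list. -/
lemma pv_nested_foldl {σ : Type} (g : σ → String → σ) (f : String → List String)
    (l : List String) (d : σ) :
    l.foldl (fun d day => (f day).foldl g d) d = (l.flatMap f).foldl g d := by
  induction l generalizing d with
  | nil => simp
  | cons x xs ih => simp [List.flatMap_cons, List.foldl_append, ih]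

lemma pv_foldl_add (l : List Int) (init : Int) :
    l.foldl (fun a x => a + x) init = init + l.sum := by
  induction l generalizing init with
  | nil => simp
  | cons x xs ih => simp [ih]; ring

/-- `ofList` commutes with `filter`. -/
lemma pv_filter_ofList (q : String → Bool) (l : List String) :
    (PySem.Set.ofList l : List String).filter q = PySem.Set.ofList (l.filter q) := by
  induction l with
  | nil => simp [PySem.Set.ofList]
  | cons y ys ih =>
    rw [PySem.Set.ofList_cons]
    by_cases hq : q y = true
    · rw [List.filter_cons_of_pos hq, PySem.Set.discard, List.filter_filter,
        List.filter_cons_of_pos hq, PySem.Set.ofList_cons, PySem.Set.discard, ← ih,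
        List.filter_filter]
      have : (fun a => q a && !a == y) = (fun a => !a == y && q a) :=
        funext fun z => Bool.and_comm _ _
      rw [this]
    · rw [List.filter_cons_of_neg hq, PySem.Set.discard, List.filter_filter,
        List.filter_cons_of_neg hq, ← ih]
      have : (fun a => q a && !a == y) = (fun a => !a == y && q a) :=
        funext fun z => Bool.and_comm _ _
      rw [this, ← List.filter_filter]
      refine (List.filter_eq_self.2 ?_)
      intro a ha
      have haq : q a = true := List.of_mem_filter ha
      have hay : a ≠ y := fun he => hq (he ▸ haq)
      simp [hay]

lemma pv_dropWhile_head (p : String → Bool) (l : List String) (y : String) (ys : List String)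
    (h : l.dropWhile p = y :: ys) : p y = false := by
  induction l with
  | nil => simp at h
  | cons a l ih =>
    rw [List.dropWhile_cons] at h
    split at h
    · exact ih h
    · cases h
      exact Bool.of_not_eq_true (by assumption)

/-- In a `≤`-sorted list `x :: xs`, nothing after the leading run of `x` equals `x`. -/
lemma pv_dropWhile_ne (x : String) (xs : List String)
    (hp : List.Pairwise (· ≤ ·) (x :: xs)) :
    ∀ y ∈ xs.dropWhile (fun y => y == x), y ≠ x := by
  cases hdm : xs.dropWhile (fun y => y == x) with
  | nil => intro y hy; cases hy
  | cons z rest =>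
    have hz : (z == x) = false := pv_dropWhile_head _ xs z rest hdm
    have hzx : z ≠ x := by simpa using hz
    have hpd : List.Pairwise (· ≤ ·) (z :: rest) := by
      rw [← hdm]
      exact List.Pairwise.sublist (List.dropWhile_sublist _) hp.of_cons
    have hzdw : z ∈ xs.dropWhile (fun y => y == x) := by
      rw [hdm]; exact List.mem_cons_self
    have hzmem : z ∈ xs := (List.dropWhile_sublist _).subset hzdw
    have hxz : x < z := lt_of_le_of_ne (List.rel_of_pairwise_cons hp hzmem) (Ne.symm hzx)
    intro y hy
    rcases List.mem_cons.1 hy with rfl | hy'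
    · exact hzx
    · have hzy : z ≤ y := List.rel_of_pairwise_cons hpd hy'
      exact fun he => absurd (he ▸ hzy) (not_le.2 hxz)

/-- A's answer equals `pvG cap tokens` where `tokens` is the flattened list. -/
lemma pv_A_eq_G (id_list : List String) (k : Int) :
    solution id_list k =
      pvG (if 0 < k then k else 0)
        (id_list.flatMap (fun day => (PySem.Set.ofList (PySem.Str.split₀ day) : List String))) := by
  unfold solution
  simp only []
  have hfun : (fun (total : PySem.Dict String Int) (day : String) =>
      let check : PySem.Set String :=
        (PySem.Str.split₀ day).foldl PySem.Set.add PySem.Set.empty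
      check.foldl (fun total num =>
        let total := if total.contains num then total else total.insert num 0
        if total.getD num 0 < k then total.insert num (total.getD num 0 + 1) else total)
        total)
    = (fun (total : PySem.Dict String Int) (day : String) =>
      ((fun d => (PySem.Set.ofList (PySem.Str.split₀ d) : List String)) day).foldl
        (fun total num =>
          let total := if total.contains num then total else total.insert num 0
          if total.getD num 0 < k then total.insert num (total.getD num 0 + 1) else total)
        total) := by
    funext total day
    simp only [PySem.Set.ofList_eq_foldl, PySem.Set.empty]
  rw [hfun, pv_nested_foldl]
  have h := pvInv_fold k
    (id_list.flatMap (fun day => (PySem.Set.ofList (PySem.Str.split₀ day) : List String)))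
    PySem.Dict.empty PySem.Dict.empty (pvInv_empty k)
  rw [PySem.Dict.foldl_insert_getD_add_one_eq_counter] at h
  obtain ⟨-, -, hitems⟩ := h
  rw [pv_foldl_add]
  simp only [PySem.Dict.values, hitems, PySem.Dict.items_counter, List.map_map, pvG, zero_add]
  rfl

/-- On a `≤`-sorted list the run scan computes `pvG`. -/
lemma pv_runScan_eq_G_aux (cap : Int) :
    ∀ (n : ℕ) (s : List String), s.length ≤ n → s.Pairwise (· ≤ ·) →
      pvRunScan cap s = pvG cap s := by
  intro n
  induction n with
  | zero =>
    intro s hs _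
    have : s = [] := List.eq_nil_of_length_eq_zero (Nat.le_zero.1 hs)
    subst this
    simp [pvRunScan, pvG, PySem.Set.ofList]
  | succ n ih =>
    intro s hlen hp
    match s with
    | [] => simp [pvRunScan, pvG, PySem.Set.ofList]
    | x :: xs =>
      have hxs : List.Pairwise (· ≤ ·) xs := hp.of_cons
      set t := xs.takeWhile (fun y => y == x) with ht
      set d := xs.dropWhile (fun y => y == x) with hd
      have hsplit : t ++ d = xs := List.takeWhile_append_dropWhile
      have htx : ∀ y ∈ t, y = x := fun y hy => by
        have := List.mem_takeWhile_imp (ht ▸ hy)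
        simpa using this
      have hdx : ∀ y ∈ d, y ≠ x := by rw [hd]; exact pv_dropWhile_ne x xs hp
      have hpd : List.Pairwise (· ≤ ·) d := by
        rw [hd]; exact List.Pairwise.sublist (List.dropWhile_sublist _) hxs
      have hld : d.length ≤ n := by
        have h1 := List.length_dropWhile_le (fun y => y == x) xs
        rw [← hd] at h1
        simp only [List.length_cons] at hlen
        omega
      have hcount1 : (x :: xs).count x = 1 + t.length := by
        rw [List.count_cons_self, ← hsplit, List.count_append]
        have h1 : t.count x = t.length := List.count_eq_length.2 fun b hb => (htx b hb).symm
        have h2 : d.count x = 0 := List.count_eq_zero.2 fun hc => (hdx x hc) rfl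
        omega
      have hcount2 : ∀ y, y ≠ x → (x :: xs).count y = d.count y := by
        intro y hy
        have h0 : t.count y = 0 := List.count_eq_zero.2 fun hc => hy (htx y hc)
        rw [← hsplit]
        simp [List.count_append, h0, Ne.symm hy]
      have hofl : (PySem.Set.ofList (x :: xs) : List String) = x :: PySem.Set.ofList d := by
        rw [PySem.Set.ofList_cons, PySem.Set.discard, pv_filter_ofList, ← hsplit,
          List.filter_append]
        have h1 : t.filter (fun y => !y == x) = [] :=
          List.filter_eq_nil_iff.2 fun a ha => by simp [htx a ha]
        have h2 : d.filter (fun y => !y == x) = d :=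
          List.filter_eq_self.2 fun a ha => by simpa using hdx a ha
        rw [h1, h2, List.nil_append]
      have hstep : pvRunScan cap (x :: xs) =
          min ((1 + t.length : Nat) : Int) cap + pvRunScan cap d := by
        rw [pvRunScan]
      rw [hstep, ih d hld hpd]
      simp only [pvG, hofl, List.map_cons, List.sum_cons]
      have hmap : (PySem.Set.ofList d : List String).map
            (fun y => min (((x :: xs).count y : Nat) : Int) cap)
          = (PySem.Set.ofList d : List String).map
            (fun y => min ((d.count y : Nat) : Int) cap) := by
        refine List.map_congr_left fun y hy => ?_
        have hyd : y ∈ d := (PySem.Set.mem_ofList _ _).1 hy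
        rw [hcount2 y (hdx y hyd)]
      rw [hmap, hcount1]

/-- `pvG` only depends on the multiset of elements. -/
lemma pv_G_perm (cap : Int) {l l' : List String} (h : l.Perm l') : pvG cap l = pvG cap l' := by
  unfold pvG
  have hofp : (PySem.Set.ofList l : List String).Perm (PySem.Set.ofList l') := by
    rw [List.perm_ext_iff_of_nodup (PySem.Set.nodup_ofList l) (PySem.Set.nodup_ofList l')]
    intro a
    simp only [PySem.Set.mem_ofList]
    exact ⟨fun ha => h.mem_iff.1 ha, fun ha => h.mem_iff.2 ha⟩
  have hcongr : (PySem.Set.ofList l : List String).map (fun x => min ((l.count x : Nat) : Int) cap)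
      = (PySem.Set.ofList l : List String).map (fun x => min ((l'.count x : Nat) : Int) cap) := by
    refine List.map_congr_left fun x _ => ?_
    rw [h.count_eq]
  rw [hcongr]
  exact (hofp.map _).sum_eq

-- ===== VERDICT (by name: the statement is the Claim_ definition above) =====
theorem solution_spec : Claim_equal_solution := by
  intro id_list k _
  show solution id_list k = solution_alt id_list k
  unfold solution_alt
  simp only []
  rw [pv_foldl_append, List.nil_append]
  set toks := id_list.flatMap (fun day => (PySem.Set.ofList (PySem.Str.split₀ day) : List String))
    with htoks
  rw [pv_runScan_eq_G_aux _ (PySem.List.sorted toks (fun x => x) false).length _ le_rfl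
    (PySem.List.sorted_pairwise toks (fun x => x)),
    pv_G_perm _ (PySem.List.sorted_perm toks (fun x => x) false), pv_A_eq_G]
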